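-- pv_equiv track=rewrite | github.com/jordanribera/CodeWars | extreme_fib/extreme_fib.py | bigfib
-- ===== SOURCE A (Python) =====
-- def bigfib(n):
--     if n == 0:
--         return (0, 1)
--     else:
--         a, b = bigfib(n // 2)
--         c = a * (b * 2 - a)
--         d = a * a + b * b
--         if n % 2 == 0:
--             return (c, d)
--         else:
--             return (d, c + d)
-- ===== SOURCE B (Python) =====
-- def bigfib(n):
--     a, b = 0, 1
--     for bit in bin(n)[2:]:
--         c = a * (2 * b - a)
--         d = a * a + b * b
--         if bit == '0':
--             a, b = c, d
--         else:
--             a, b = d, c + d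
--     return (a, b)
-- ===== Notes on version B (the rewrite author's own statement) =====
-- stated objective: alternative
-- what changed: Replaces the halving recursion by an iterative fast-doubling loop over n's bits from most significant to least, carrying (a,b) as an accumulator.
-- outside the precondition, e.g. on bigfib(-1): A raises RecursionError, B returns (2, 3)
import Mathlib
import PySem

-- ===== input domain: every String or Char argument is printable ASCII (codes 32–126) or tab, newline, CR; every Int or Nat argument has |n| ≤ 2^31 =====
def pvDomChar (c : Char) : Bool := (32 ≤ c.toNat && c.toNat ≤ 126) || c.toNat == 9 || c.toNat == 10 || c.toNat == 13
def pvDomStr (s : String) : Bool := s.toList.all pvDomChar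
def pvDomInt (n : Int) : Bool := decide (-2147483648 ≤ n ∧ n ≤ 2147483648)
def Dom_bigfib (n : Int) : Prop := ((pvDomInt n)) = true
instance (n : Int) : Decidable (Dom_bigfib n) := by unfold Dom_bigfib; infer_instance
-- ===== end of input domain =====

-- B replaces A's halving recursion by an iterative fast-doubling loop over n's bits (MSB first); alternative decomposition, same cost.


-- ===== PORT A =====
-- A's recursion 'bigfib(n // 2)' terminates only for n ≥ 0 (Python hits RecursionError for
-- n < 0, excluded by Pre_); the recursion is therefore carried out on n.toNat, where
-- n // 2 = n.toNat / 2 exactly.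
def bigfibAux : Nat → Int × Int
  | 0 => (0, 1)
  | (m+1) =>
      let p := bigfibAux ((m+1) / 2)
      let a := p.1
      let b := p.2
      let c := a * (b * 2 - a)
      let d := a * a + b * b
      if (m+1) % 2 == 0 then (c, d) else (d, c + d)

def bigfib (n : Int) : Int × Int := bigfibAux n.toNat

-- ===== PORT B =====
-- bits of bin(n)[2:] for nonnegative n: MSB-first bit list; a single false bit when n is zero.
def bitsOf : Nat → List Bool
  | 0 => []
  | (m+1) => bitsOf ((m+1) / 2) ++ [(m+1) % 2 == 1]

def fibStep (p : Int × Int) (bit : Bool) : Int × Int :=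
  let c := p.1 * (2 * p.2 - p.1)
  let d := p.1 * p.1 + p.2 * p.2
  if bit then (d, c + d) else (c, d)

def bigfib_alt (n : Int) : Int × Int :=
  let bits := if n == 0 then [false] else bitsOf n.toNat
  List.foldl fibStep (0, 1) bits

-- ===== PRECONDITION & SPEC =====
-- Pre_ excludes n < 0, where Python A recurses forever (RecursionError).
def Pre_bigfib (n : Int) : Prop := 0 ≤ n
instance (n : Int) : Decidable (Pre_bigfib n) := by unfold Pre_bigfib; infer_instance
def pvWitness_bigfib : Int := 10

def Spec_bigfib (n : Int) (out : Int × Int) : Prop := out = bigfib_alt n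
instance (n : Int) (out : Int × Int) : Decidable (Spec_bigfib n out) := by unfold Spec_bigfib; infer_instance

-- ===== CLAIM (what is proved, stated in full; the proofs are below) =====
def Claim_equal_bigfib : Prop := ∀ (n : Int), Dom_bigfib n → Pre_bigfib n → Spec_bigfib n (bigfib n)

-- ===== LEMMAS AND PROOFS =====
theorem foldl_bitsOf (m : Nat) : List.foldl fibStep (0, 1) (bitsOf m) = bigfibAux m := by
  induction m using Nat.strong_induction_on with
  | _ m ih =>
    match m with
    | 0 => simp [bitsOf, bigfibAux]
    | (k+1) =>
      rw [bitsOf, List.foldl_append, ih ((k+1) / 2) (Nat.div_lt_self (Nat.succ_pos k) (by norm_num))]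
      show fibStep (bigfibAux ((k+1)/2)) ((k+1) % 2 == 1) = bigfibAux (k+1)
      rw [bigfibAux]
      rcases Nat.mod_two_eq_zero_or_one (k+1) with h | h <;>
        simp only [fibStep, h, Nat.reduceBEq, if_true, if_false, Bool.false_eq_true,
          Prod.mk.injEq] <;> constructor <;> first | trivial | ring

-- ===== VERDICT (by name: the statement is the Claim_ definition above) =====
theorem bigfib_spec : Claim_equal_bigfib := by
  intro n _ hpre
  show bigfib n = bigfib_alt n
  unfold bigfib bigfib_alt
  by_cases h0 : n = 0
  · subst h0; simp [bigfibAux, fibStep]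
  · have : (n == 0) = false := by simp [h0]
    rw [this]
    simp only [Bool.false_eq_true, if_false, foldl_bitsOf]
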